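-- pv_equiv track=rewrite | github.com/papakos21/Minesweeper | MinesweeperBoard.py | get_coordinate_position_of_bombs_2
-- ===== SOURCE A (Python) =====
-- from typing import List, Tuple
--
-- def get_coordinate_position_of_bombs_2(position_of_bombs: List[int],
--                                        row_size: int,
--                                        column_size: int) -> List[Tuple[int, int]]:
--     """get the coordinates of the position of bombs"""
--     count = 0
--     coordinates_to_return = []
--     for row in range(row_size):
--         for column in range(column_size):
--             if count in position_of_bombs:
--                 coordinates_to_return.append((row, column))
--             count += 1
--     return coordinates_to_return
-- ===== SOURCE B (Python) =====
-- def get_coordinate_position_of_bombs_2(position_of_bombs, row_size, column_size):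
--     """get the coordinates of the position of bombs"""
--     if row_size <= 0 or column_size <= 0:
--         return []
--     n = row_size * column_size
--     return [divmod(b, column_size)
--             for b in sorted(set(position_of_bombs))
--             if 0 <= b < n]
-- ===== Notes on version B (the rewrite author's own statement) =====
-- stated objective: faster
-- what changed: Instead of scanning every grid cell and membership-testing the bomb list at each cell, B sorts the de-duplicated bomb indices once and maps each in-range index b to divmod(b, column_size).
import Mathlib
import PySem

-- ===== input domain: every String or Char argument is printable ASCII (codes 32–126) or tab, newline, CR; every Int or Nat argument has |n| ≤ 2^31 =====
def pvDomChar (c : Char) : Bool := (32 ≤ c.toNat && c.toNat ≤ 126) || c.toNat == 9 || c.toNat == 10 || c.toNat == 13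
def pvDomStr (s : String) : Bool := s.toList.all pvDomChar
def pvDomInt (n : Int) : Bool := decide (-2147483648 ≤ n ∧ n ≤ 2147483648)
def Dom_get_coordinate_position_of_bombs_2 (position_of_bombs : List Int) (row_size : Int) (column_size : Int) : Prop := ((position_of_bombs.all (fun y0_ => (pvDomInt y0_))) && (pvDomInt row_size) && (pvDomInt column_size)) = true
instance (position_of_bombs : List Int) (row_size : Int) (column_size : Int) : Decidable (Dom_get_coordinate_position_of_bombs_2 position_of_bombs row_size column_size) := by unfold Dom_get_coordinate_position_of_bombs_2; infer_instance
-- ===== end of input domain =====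

-- B replaces A's scan of every grid cell (with a bomb-list membership test per cell) by
-- sorting the de-duplicated bomb indices once and mapping each in-range index through divmod.

-- ===== PORT A =====
def get_coordinate_position_of_bombs_2 (position_of_bombs : List Int) (row_size : Int) (column_size : Int) : List (Int × Int) :=
  -- count = 0; coordinates_to_return = []; nested for-loops carry (count, coordinates) as state
  let st :=
    (PySem.List.pyRange 0 row_size 1).foldl (fun st row =>
      (PySem.List.pyRange 0 column_size 1).foldl (fun st column =>
        if st.1 ∈ position_of_bombs then
          (st.1 + 1, st.2 ++ [(row, column)])
        else
          (st.1 + 1, st.2)) st) ((0 : Int), ([] : List (Int × Int)))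
  st.2

-- ===== PORT B =====
def get_coordinate_position_of_bombs_2_alt (position_of_bombs : List Int) (row_size : Int) (column_size : Int) : List (Int × Int) :=
  if row_size ≤ 0 ∨ column_size ≤ 0 then []
  else
    let n := row_size * column_size
    -- divmod(b, column_size) ported as (floordiv, mod); column_size ≠ 0 holds for every mapped element
    ((PySem.List.sorted (PySem.Set.ofList position_of_bombs) (fun x => x) false).filter
        (fun b => decide (0 ≤ b) && decide (b < n))).map
      (fun b => (PySem.Int.floordiv b column_size, PySem.Int.mod b column_size))

-- ===== PRECONDITION & SPEC =====
def Spec_get_coordinate_position_of_bombs_2 (position_of_bombs : List Int) (row_size : Int) (column_size : Int) (out : List (Int × Int)) : Prop := out = get_coordinate_position_of_bombs_2_alt position_of_bombs row_size column_size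
instance (position_of_bombs : List Int) (row_size : Int) (column_size : Int) (out : List (Int × Int)) : Decidable (Spec_get_coordinate_position_of_bombs_2 position_of_bombs row_size column_size out) := by unfold Spec_get_coordinate_position_of_bombs_2; infer_instance

-- ===== CLAIM (what is proved, stated in full; the proofs are below) =====
def Claim_equal_get_coordinate_position_of_bombs_2 : Prop := ∀ (position_of_bombs : List Int) (row_size : Int) (column_size : Int), Dom_get_coordinate_position_of_bombs_2 position_of_bombs row_size column_size → Spec_get_coordinate_position_of_bombs_2 position_of_bombs row_size column_size (get_coordinate_position_of_bombs_2 position_of_bombs row_size column_size)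

-- ===== LEMMAS AND PROOFS =====

-- A's inner loop over columns j..col-1 with running count c: each column v with
-- count c + (v - j) in the bomb list appends (row, v).
theorem pv_inner (bombs : List Int) (row : Int) :
    ∀ (m : Nat) (j col c : Int) (acc : List (Int × Int)), col - j = (m : Int) →
      (PySem.List.pyRange j col 1).foldl (fun st column =>
          if st.1 ∈ bombs then (st.1 + 1, st.2 ++ [(row, column)]) else (st.1 + 1, st.2))
        (c, acc)
      = (c + (m : Int),
         acc ++ ((PySem.List.pyRange j col 1).filter
            (fun v => decide ((c + (v - j)) ∈ bombs))).map (fun v => (row, v))) := by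
  intro m
  induction m with
  | zero =>
    intro j col c acc h
    rw [PySem.List.pyRange_one_eq_nil (by omega)]
    simp
  | succ m ih =>
    intro j col c acc h
    rw [PySem.List.pyRange_one_cons (by omega)]
    simp only [List.foldl_cons, List.filter_cons]
    have hz : c + (j - j) = c := by ring
    rw [hz]
    have hfun : (fun v => decide ((c + 1 + (v - (j + 1))) ∈ bombs))
        = (fun v => decide ((c + (v - j)) ∈ bombs)) := by
      funext v
      have : c + 1 + (v - (j + 1)) = c + (v - j) := by ring
      rw [this]
    by_cases hc : c ∈ bombs
    · simp only [if_pos hc, decide_eq_true hc]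
      rw [ih (j + 1) col (c + 1) (acc ++ [(row, j)]) (by omega), hfun]
      simp only [ite_true, List.map_cons, Prod.mk.injEq, List.append_assoc,
        List.cons_append, List.nil_append]
      exact ⟨by push_cast; ring, trivial⟩
    · simp only [if_neg hc, decide_eq_false hc]
      rw [ih (j + 1) col (c + 1) acc (by omega), hfun]
      simp only [Bool.false_eq_true, ite_false, Prod.mk.injEq]
      exact ⟨by push_cast; ring, trivial⟩

-- One full row, re-indexed by the flat counts c..c+col-1 of that row.
theorem pv_row (bombs : List Int) (row col : Int) (hcol : 0 < col) (c : Int) (acc : List (Int × Int)) :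
    (PySem.List.pyRange 0 col 1).foldl (fun st column =>
        if st.1 ∈ bombs then (st.1 + 1, st.2 ++ [(row, column)]) else (st.1 + 1, st.2))
      (c, acc)
    = (c + col,
       acc ++ ((PySem.List.pyRange c (c + col) 1).filter (fun b => decide (b ∈ bombs))).map
          (fun b => (row, b - c))) := by
  rw [pv_inner bombs row col.toNat 0 col c acc (by omega), Prod.mk.injEq]
  refine ⟨by omega, ?_⟩
  rw [PySem.List.pyRange_one 0 col, PySem.List.pyRange_one c (c + col)]
  simp only [List.filter_map, List.map_map, Function.comp_def]
  have hn : ((col - 0).toNat) = ((c + col - c).toNat) := by omega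
  rw [hn]
  have hp : List.filter (fun k : Nat => decide (c + (((0:Int) + k) - 0) ∈ bombs))
        (List.range ((c + col - c).toNat))
      = List.filter (fun k : Nat => decide ((c + k) ∈ bombs)) (List.range ((c + col - c).toNat)) := by
    apply List.filter_congr
    intro k _
    have : c + (((0:Int) + k) - 0) = c + k := by ring
    rw [this]
  rw [hp]
  congr 1
  apply List.map_congr_left
  intro k _
  have h1 : (0:Int) + k = c + k - c := by ring
  rw [h1]

-- A's outer loop over rows i..row-1 starting at count i*col, phrased over the flat counts.
theorem pv_outer (bombs : List Int) (col : Int) (hcol : 0 < col) :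
    ∀ (m : Nat) (i row : Int) (acc : List (Int × Int)), row - i = (m : Int) →
      (PySem.List.pyRange i row 1).foldl (fun st r =>
          (PySem.List.pyRange 0 col 1).foldl (fun st column =>
            if st.1 ∈ bombs then (st.1 + 1, st.2 ++ [(r, column)]) else (st.1 + 1, st.2)) st)
        (i * col, acc)
      = (row * col,
         acc ++ ((PySem.List.pyRange (i * col) (row * col) 1).filter (fun b => decide (b ∈ bombs))).map
            (fun b => (PySem.Int.floordiv b col, PySem.Int.mod b col))) := by
  intro m
  induction m with
  | zero =>
    intro i row acc h
    have hri : row = i := by omega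
    rw [hri, PySem.List.pyRange_one_eq_nil (a := i) (b := i) le_rfl,
      PySem.List.pyRange_one_eq_nil (a := i * col) (b := i * col) le_rfl]
    simp
  | succ m ih =>
    intro i row acc h
    rw [PySem.List.pyRange_one_cons (a := i) (b := row) (by omega)]
    rw [List.foldl_cons]
    rw [pv_row bombs i col hcol (i * col) acc]
    have hstep : i * col + col = (i + 1) * col := by ring
    rw [hstep, ih (i + 1) row _ (by omega)]
    have hsplit : PySem.List.pyRange (i * col) (row * col) 1
        = PySem.List.pyRange (i * col) ((i + 1) * col) 1 ++ PySem.List.pyRange ((i + 1) * col) (row * col) 1 := by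
      refine PySem.List.pyRange_one_append _ _ _ ?_ ?_
      · exact mul_le_mul_of_nonneg_right (by omega) hcol.le
      · exact mul_le_mul_of_nonneg_right (show (i + 1 : Int) ≤ row by omega) hcol.le
    rw [hsplit]
    simp only [List.filter_append, List.map_append, List.append_assoc]
    congr 2
    congr 1
    apply List.map_congr_left
    intro b hb
    have hbmem : b ∈ PySem.List.pyRange (i * col) ((i + 1) * col) 1 := (List.mem_filter.mp hb).1
    have hbnd := (PySem.List.mem_pyRange_one).mp hbmem
    have hdiv : PySem.Int.floordiv b col = i := by
      rw [PySem.Int.floordiv_eq_iff_of_pos hcol]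
      exact ⟨hbnd.1, hbnd.2⟩
    have hmod : PySem.Int.mod b col = b - i * col := by
      have := PySem.Int.floordiv_mul_add_mod b col
      rw [hdiv] at this
      omega
    rw [hdiv, hmod]

-- B's filtered sorted set equals the increasing list of in-range bomb indices.
theorem pv_b_filter (bombs : List Int) (n : Int) :
    (PySem.List.sorted (PySem.Set.ofList bombs) (fun x => x) false).filter
        (fun b => decide (0 ≤ b) && decide (b < n))
      = (PySem.List.pyRange 0 n 1).filter (fun b => decide (b ∈ bombs)) := by
  have hnl : ((PySem.List.sorted (PySem.Set.ofList bombs) (fun x => x) false).filter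
      (fun b => decide (0 ≤ b) && decide (b < n))).Nodup :=
    ((PySem.List.sorted_ofList_pairwise_lt bombs).filter _).nodup
  have hnr : ((PySem.List.pyRange 0 n 1).filter (fun b => decide (b ∈ bombs))).Nodup :=
    ((PySem.List.pairwise_lt_pyRange_one 0 n).filter _).nodup
  have hperm : ((PySem.List.sorted (PySem.Set.ofList bombs) (fun x => x) false).filter
        (fun b => decide (0 ≤ b) && decide (b < n))).Perm
      ((PySem.List.pyRange 0 n 1).filter (fun b => decide (b ∈ bombs))) := by
    rw [List.perm_ext_iff_of_nodup hnl hnr]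
    intro x
    simp [List.mem_filter, PySem.List.mem_sorted, PySem.Set.mem_ofList, PySem.List.mem_pyRange_one]
    tauto
  exact List.Perm.eq_of_pairwise (le := fun a b : Int => a < b)
    (fun a b _ _ hab hba => absurd hba (not_lt.mpr hab.le))
    ((PySem.List.sorted_ofList_pairwise_lt bombs).filter _)
    ((PySem.List.pairwise_lt_pyRange_one 0 n).filter _) hperm

-- ===== VERDICT (by name: the statement is the Claim_ definition above) =====
theorem get_coordinate_position_of_bombs_2_spec : Claim_equal_get_coordinate_position_of_bombs_2 := by
  intro bombs row col _
  unfold Spec_get_coordinate_position_of_bombs_2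
  unfold get_coordinate_position_of_bombs_2 get_coordinate_position_of_bombs_2_alt
  by_cases hdeg : row ≤ 0 ∨ col ≤ 0
  · rw [if_pos hdeg]
    rcases hdeg with hr | hc
    · rw [PySem.List.pyRange_one_eq_nil (a := (0:Int)) (b := row) (by omega)]
      simp
    · simp only [PySem.List.pyRange_one_eq_nil (a := (0:Int)) (b := col) (by omega),
        List.foldl_nil]
      simp
  · rw [if_neg hdeg]
    push_neg at hdeg
    obtain ⟨hr, hc⟩ := hdeg
    have := pv_outer bombs col hc row.toNat 0 row [] (by omega)
    rw [zero_mul] at this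
    simp only [this]
    rw [pv_b_filter bombs (row * col)]
    simp
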